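/- GENERATED by tools/from_farm_form.py from prooffarm-gif/accepted/DGifSlurp.6/Proof.lean (a worked proof of the farm's unit `DGifSlurp.6`,
   accepted by the verdict) — do not edit. -/
import Gif.Spec.Units.DGifSlurp_6
import Gif.Spec.AllSegs
import Gif.Spec.Proved.DGifSlurp_6_Lemmas

open X86 X86.User Asan ProgX.Base ProgX.Base.Spec Gif.Spec

/-!
  `DGifSlurp.6` (0x10a7bd … 0x10a7d4 and 0x10a9c0 … 0x10a9cd, 10 instructions; dgif_lib.c:1259-1262): A BODY SEGMENT OF THE PROTECTED
  FUNCTION `DGifSlurp` WITH TWO CALLS: `DGifGetLine(gif, sp->RasterBits, ImageSize)` for the whole raster of a not interlaced image, and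
  on GIF_ERROR `DGifDecreaseImageCounter(gif)` before the jump to the epilogue. The first call's return address 0x10a7ca (`ret11`) is not
  a cut of the design: the unit uses the family's assertion `IR` there (with the cut `ret11`) and walks twice (Lemmas.lean), chained here.
-/

/-- Segment 6 of `DGifSlurp` takes `NI` at 0x10a7bd to `IR` at 0x10a7d4 (GIF_OK) or to `Done` at 0x10a8ed (GIF_ERROR). -/
theorem Gif.Spec.Proved.DGifSlurp_6_ok : Gif.Spec.DGifSlurp_6.Statement := by
  intro Lay hLay μ hμ u₀ hcode h_DGifGetLine h_DGifDecreaseImageCounter H rest frames F R Hc Fc m e ret v hat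
  -- the callees' contracts for the frame list of the body (the own frame in front), the PRESENT heap and forest
  have hgl := h_DGifGetLine Hc rest (DGifSlurp.framesIn frames e) Fc R
  have hdec := h_DGifDecreaseImageCounter Hc rest (DGifSlurp.framesIn frames e) Fc R
  -- 0x10a7bd … the call of DGifGetLine … 0x10a7ca
  refine (Gif.Spec.DGifSlurp_6.seg6_seg_call Lay hLay μ hμ u₀ hcode H rest frames F R Hc Fc m e ret hgl v hat).trans ?_
  -- 0x10a7ca … 0x10a7d4 | … the call of DGifDecreaseImageCounter … 0x10a8ed
  intro v1 hv1
  exact Gif.Spec.DGifSlurp_6.seg6_seg_tail Lay hLay μ hμ u₀ hcode H rest frames F R Hc Fc m e ret hdec v1 hv1
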